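-- pv_equiv track=rewrite | github.com/axa-rev-research/gutek | experiments/Human-Interpretability-Appendix/src/text_interpreters.py | update_entries
-- ===== SOURCE A (Python) =====
-- def update_entries(entries, n_cols, resetter=0):
--     # update list of paragraps to remove
--     if len(entries) == 1:
--         entries[0] += 1
--         carry = 0
--         if entries[0] >= n_cols:
--             carry = 1
--             entries[0] = resetter
--     else:
--         potential_carry = 1 if 1 + entries[0] >= n_cols - len(entries) + 1 else 0
--         child_resetter = entries[0] + 2 if not potential_carry == 1 else resetter + 1
--         new_entries, old_carry = update_entries(
--             entries[1:], n_cols, resetter=child_resetter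
--         )
--         carry = potential_carry * old_carry
--         entries = [resetter if carry else entries[0] + old_carry] + new_entries
--     return entries, carry
-- ===== SOURCE B (Python) =====
-- def update_entries(entries, n_cols, resetter=0):
--     # Iterative re-implementation: forward pass collecting per-level (potential
--     # carry, resetter, entry), then a backward pass threading the carry.
--     n = len(entries)
--     if n == 1:
--         entries[0] += 1
--         if entries[0] >= n_cols:
--             entries[0] = resetter
--             return entries, 1
--         return entries, 0
--     levels = []
--     r = resetter
--     for i, e in enumerate(entries[:-1]):
--         pc = 1 if 1 + e >= n_cols - (n - i) + 1 else 0
--         levels.append((pc, r, e))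
--         r = r + 1 if pc else e + 2
--     val = entries[-1] + 1
--     carry = 1 if val >= n_cols else 0
--     out = [r if carry else val]
--     for pc, res, e in reversed(levels):
--         c = pc * carry
--         out.insert(0, res if c else e + carry)
--         carry = c
--     return out, carry
-- ===== Notes on version B (the rewrite author's own statement) =====
-- stated objective: alternative
-- what changed: Replaces A's recursion (one call and one entries[1:] copy per suffix) by two explicit passes: a forward pass collecting per-level (potential_carry, resetter, entry) triples, then a backward pass threading the carry; the empty list, on which both raise IndexError, is excluded by Pre_.
import Mathlib
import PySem

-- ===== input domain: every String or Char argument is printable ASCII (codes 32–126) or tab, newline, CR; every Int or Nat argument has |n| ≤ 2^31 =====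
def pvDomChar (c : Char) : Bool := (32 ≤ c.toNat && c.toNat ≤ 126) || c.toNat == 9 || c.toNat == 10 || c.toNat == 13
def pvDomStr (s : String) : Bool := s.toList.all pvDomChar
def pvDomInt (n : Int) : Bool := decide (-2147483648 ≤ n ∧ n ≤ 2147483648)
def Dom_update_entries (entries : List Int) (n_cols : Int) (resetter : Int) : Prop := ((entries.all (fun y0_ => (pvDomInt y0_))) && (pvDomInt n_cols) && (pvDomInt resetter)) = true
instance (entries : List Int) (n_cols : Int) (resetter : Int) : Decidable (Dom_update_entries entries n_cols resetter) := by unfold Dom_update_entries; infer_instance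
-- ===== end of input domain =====

-- B replaces A's recursion by two iterative passes (forward resetter/potential-carry pass,
-- backward carry pass); equivalence is about the RETURN value only (A mutates and returns the
-- caller's list on len==1, B in Python does the same, but aliasing is not modelled here).

-- ===== PORT A =====
def update_entries (entries : List Int) (n_cols : Int) (resetter : Int) : List Int × Int :=
  match entries with
  | [] => ([], 0)  -- unreachable under Pre_ (Python raises IndexError on [])
  | [e] =>
      let e := e + 1
      if e ≥ n_cols then ([resetter], 1) else ([e], 0)
  | e :: tail =>
      let potential_carry : Int := if 1 + e ≥ n_cols - ((e :: tail).length : Int) + 1 then 1 else 0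
      let child_resetter := if ¬ potential_carry = 1 then e + 2 else resetter + 1
      let r := update_entries tail n_cols child_resetter
      let carry := potential_carry * r.2
      ((if carry ≠ 0 then resetter else e + r.2) :: r.1, carry)

-- ===== PORT B =====
-- forward-pass body: collects (potential_carry, resetter, entry) per level and threads r
def altFwdBody (n_cols n : Int) (st : List (Int × Int × Int) × Int) (ie : Int × Int) : List (Int × Int × Int) × Int :=
  let pc : Int := if 1 + ie.2 ≥ n_cols - (n - ie.1) + 1 then 1 else 0
  (st.1 ++ [(pc, st.2, ie.2)], if pc ≠ 0 then st.2 + 1 else ie.2 + 2)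

-- backward-pass body: threads the carry and prepends the updated entry
def altBwdBody (st : List Int × Int) (l : Int × Int × Int) : List Int × Int :=
  let c := l.1 * st.2
  ((if c ≠ 0 then l.2.1 else l.2.2 + st.2) :: st.1, c)

def update_entries_alt (entries : List Int) (n_cols : Int) (resetter : Int) : List Int × Int :=
  match entries with
  | [] => ([], 0)  -- unreachable under Pre_ (Python raises IndexError on [])
  | [e] => if e + 1 ≥ n_cols then ([resetter], 1) else ([e + 1], 0)
  | _ :: _ :: _ =>
      let n : Int := entries.length
      let fwd := (PySem.List.enumerate entries.dropLast 0).foldl (altFwdBody n_cols n) ([], resetter)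
      let v := (PySem.List.pyGet? entries (-1)).getD 0 + 1
      let carry : Int := if v ≥ n_cols then 1 else 0
      fwd.1.reverse.foldl altBwdBody ([if carry ≠ 0 then fwd.2 else v], carry)

-- ===== PRECONDITION & SPEC =====
-- Pre_ excludes only the empty list, on which both Pythons raise IndexError.
def Pre_update_entries (entries : List Int) (n_cols : Int) (resetter : Int) : Prop := entries ≠ []
instance (entries : List Int) (n_cols : Int) (resetter : Int) : Decidable (Pre_update_entries entries n_cols resetter) := by unfold Pre_update_entries; infer_instance
def pvWitness_update_entries : List Int × Int × Int := ([0, 1], 4, 0)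
def Spec_update_entries (entries : List Int) (n_cols : Int) (resetter : Int) (out : List Int × Int) : Prop := out = update_entries_alt entries n_cols resetter
instance (entries : List Int) (n_cols : Int) (resetter : Int) (out : List Int × Int) : Decidable (Spec_update_entries entries n_cols resetter out) := by unfold Spec_update_entries; infer_instance

-- ===== CLAIM (what is proved, stated in full; the proofs are below) =====
def Claim_equal_update_entries : Prop := ∀ (entries : List Int) (n_cols : Int) (resetter : Int), Dom_update_entries entries n_cols resetter → Pre_update_entries entries n_cols resetter → Spec_update_entries entries n_cols resetter (update_entries entries n_cols resetter)

-- ===== LEMMAS AND PROOFS =====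

-- the forward fold only appends to the levels list: the initial levels factor out
theorem fwd_acc (L : List (Int × Int)) (nc n : Int) (P : List (Int × Int × Int)) (r : Int) :
    L.foldl (altFwdBody nc n) (P, r) =
      (P ++ (L.foldl (altFwdBody nc n) ([], r)).1, (L.foldl (altFwdBody nc n) ([], r)).2) := by
  induction L generalizing P r with
  | nil => simp
  | cons x L ih =>
      simp only [List.foldl_cons, altFwdBody, List.nil_append]
      rw [ih]
      conv_rhs => rw [ih]
      simp [List.append_assoc]

-- shifting the enumeration start and the length parameter together changes nothing
theorem fwd_shift (l : List Int) (nc : Int) (n s : Int) (st : List (Int × Int × Int) × Int) :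
    (PySem.List.enumerate l (s + 1)).foldl (altFwdBody nc (n + 1)) st =
      (PySem.List.enumerate l s).foldl (altFwdBody nc n) st := by
  induction l generalizing s st with
  | nil => simp [PySem.List.enumerate_nil]
  | cons x l ih =>
      rw [PySem.List.enumerate_cons, PySem.List.enumerate_cons]
      simp only [List.foldl_cons]
      have h : nc - (n + 1 - (s + 1)) + 1 = nc - (n - s) + 1 := by ring
      simp only [altFwdBody, h]
      exact ih (s + 1) _

-- one-step unfolding of B on a list of length ≥ 2, phrased like A's recursive step
theorem alt_unfold (e : Int) (tail : List Int) (hne : tail ≠ []) (nc rs pc child : Int)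
    (hpc : pc = if 1 + e ≥ nc - ((e :: tail).length : Int) + 1 then 1 else 0)
    (hch : child = if 1 + e ≥ nc - ((e :: tail).length : Int) + 1 then rs + 1 else e + 2) :
    update_entries_alt (e :: tail) nc rs =
      ((if pc * (update_entries_alt tail nc child).2 ≠ 0 then rs
        else e + (update_entries_alt tail nc child).2) :: (update_entries_alt tail nc child).1,
       pc * (update_entries_alt tail nc child).2) := by
  obtain ⟨f, rest, rfl⟩ : ∃ f rest, tail = f :: rest := by
    cases tail with | nil => exact absurd rfl hne | cons f rest => exact ⟨f, rest, rfl⟩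
  have hlen : ((e :: f :: rest).length : Int) = ((f :: rest).length : Int) + 1 := by
    push_cast [List.length_cons]; ring
  conv_lhs => rw [update_entries_alt]
  have hdrop : (e :: f :: rest).dropLast = e :: (f :: rest).dropLast := by
    simp [List.dropLast]
  rw [hdrop, PySem.List.enumerate_cons]
  simp only [List.foldl_cons]
  have hbody : altFwdBody nc ((e :: f :: rest).length : Int) ([], rs) (0, e) =
      ([(pc, rs, e)], child) := by
    simp only [altFwdBody, hpc, hch, sub_zero]
    by_cases h : (1:Int) + e ≥ nc - ((e :: f :: rest).length : Int) + 1 <;> simp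
  rw [hbody]
  rw [show (0:Int) + 1 = 0 + 1 from rfl]
  rw [hlen, fwd_shift ((f :: rest).dropLast) nc ((f :: rest).length : Int) 0]
  rw [fwd_acc]
  set FT := ((PySem.List.enumerate (f :: rest).dropLast 0).foldl
      (altFwdBody nc ((f :: rest).length : Int)) ([], child)) with hFT
  have hget : PySem.List.pyGet? (e :: f :: rest) (-1) = PySem.List.pyGet? (f :: rest) (-1) := by
    rw [PySem.List.pyGet?_neg_one, PySem.List.pyGet?_neg_one]
    simp [List.getLast?_cons]
  rw [hget]
  simp only [List.cons_append, List.nil_append, List.reverse_cons, List.foldl_append,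
    List.foldl_cons, List.foldl_nil]
  have htail : (FT.1.reverse.foldl altBwdBody
      ([if (if (PySem.List.pyGet? (f :: rest) (-1)).getD 0 + 1 ≥ nc then (1:Int) else 0) ≠ 0 then FT.2
        else (PySem.List.pyGet? (f :: rest) (-1)).getD 0 + 1],
       if (PySem.List.pyGet? (f :: rest) (-1)).getD 0 + 1 ≥ nc then (1:Int) else 0)) =
      update_entries_alt (f :: rest) nc child := by
    cases rest with
    | nil =>
        simp only [hFT]
        simp [update_entries_alt, PySem.List.enumerate_nil, PySem.List.pyGet?_neg_one]
        split <;> simp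
    | cons g rest' =>
        rfl
  rw [htail]
  simp [altBwdBody]

theorem main_eq (entries : List Int) : ∀ (nc rs : Int), entries ≠ [] →
    update_entries entries nc rs = update_entries_alt entries nc rs := by
  induction entries with
  | nil => intro nc rs hne; exact absurd rfl hne
  | cons e tail ih =>
      intro nc rs _
      cases tail with
      | nil => rfl
      | cons f rest =>
          rw [update_entries, alt_unfold e (f :: rest) (List.cons_ne_nil f rest) nc rs _ _ rfl rfl]
          rw [← ih nc (if (1:Int) + e ≥ nc - ((e :: f :: rest).length : Int) + 1
                        then rs + 1 else e + 2) (List.cons_ne_nil f rest)]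
          by_cases h : nc - ((rest.length : Int) + 1 + 1) < 1 + e
          · simp [h]
          · simp [h]
          · simp

-- ===== VERDICT (by name: the statement is the Claim_ definition above) =====
theorem update_entries_spec : Claim_equal_update_entries := by
  intro entries n_cols resetter _ hpre
  exact main_eq entries n_cols resetter hpre
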